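-- pv_equiv track=rewrite | github.com/christos42/CLDR_CLNER_models | offline_graph_creation.py | sampling_graphs
-- ===== SOURCE A (Python) =====
-- def sampling_graphs(r_tar, r_all, length):
-- 	possible_pairs_drug = []
-- 	possible_pairs_ae = []
-- 	for i in range(length):
-- 		if ([r_tar[0], i] not in r_all) and ([i, r_tar[0]] not in r_all) and (r_tar[0] != i):
-- 			possible_pairs_drug.append([r_tar[0], i])
-- 		if ([i, r_tar[1]] not in r_all) and ([r_tar[1], i] not in r_all) and (r_tar[1] != i):
-- 			possible_pairs_ae.append([i, r_tar[1]])
--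
-- 	return possible_pairs_drug, possible_pairs_ae
-- ===== SOURCE B (Python) =====
-- def sampling_graphs(r_tar, r_all, length):
--     t0, t1 = r_tar[0], r_tar[1]
--     blocked0, blocked1 = {t0}, {t1}
--     for p in r_all:
--         if len(p) == 2:
--             a, b = p
--             if a == t0:
--                 blocked0.add(b)
--             if b == t0:
--                 blocked0.add(a)
--             if a == t1:
--                 blocked1.add(b)
--             if b == t1:
--                 blocked1.add(a)
--     possible_pairs_drug = [[t0, i] for i in sorted(set(range(length)) - blocked0)]
--     possible_pairs_ae = [[i, t1] for i in sorted(set(range(length)) - blocked1)]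
--     return possible_pairs_drug, possible_pairs_ae
-- ===== Notes on version B (the rewrite author's own statement) =====
-- stated objective: faster
-- what changed: B works subtractively by set algebra: it collects each target's blocked values (the target itself plus its neighbours in r_all) in one pass, then takes sorted(set(range(length)) - blocked) and formats the pairs, instead of A's per-index candidate loop with four list-membership scans of r_all.
-- outside the precondition, e.g. on sampling_graphs([], [], 0): A returns ([], []), B raises IndexError
import Mathlib
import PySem

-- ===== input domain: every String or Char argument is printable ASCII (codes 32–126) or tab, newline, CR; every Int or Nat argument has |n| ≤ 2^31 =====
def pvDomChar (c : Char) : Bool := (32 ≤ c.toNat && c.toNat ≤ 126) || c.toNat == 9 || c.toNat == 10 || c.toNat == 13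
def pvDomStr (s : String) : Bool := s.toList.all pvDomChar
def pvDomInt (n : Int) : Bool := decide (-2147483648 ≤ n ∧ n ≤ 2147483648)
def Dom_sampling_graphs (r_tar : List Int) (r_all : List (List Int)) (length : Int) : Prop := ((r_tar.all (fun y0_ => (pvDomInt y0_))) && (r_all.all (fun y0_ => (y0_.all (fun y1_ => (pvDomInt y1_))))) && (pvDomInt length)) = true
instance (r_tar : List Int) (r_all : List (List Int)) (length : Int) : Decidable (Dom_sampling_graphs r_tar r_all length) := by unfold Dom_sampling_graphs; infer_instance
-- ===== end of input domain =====

-- B is subtractive set algebra: one pass over r_all collects each target's blocked values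
-- (the target itself plus its r_all neighbours), then sorted(set(range(length)) - blocked)
-- yields the candidate indices (faster: removes A's per-index scans of r_all).

-- ===== PORT A =====
-- the body of A's for-loop (both appends of one iteration)
def pvAstep (t0 t1 : Int) (r_all : List (List Int))
    (acc : List (List Int) × List (List Int)) (i : Int) :
    List (List Int) × List (List Int) :=
  let acc := if [t0, i] ∉ r_all ∧ [i, t0] ∉ r_all ∧ t0 ≠ i then (acc.1 ++ [[t0, i]], acc.2) else acc
  if [i, t1] ∉ r_all ∧ [t1, i] ∉ r_all ∧ t1 ≠ i then (acc.1, acc.2 ++ [[i, t1]]) else acc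

def sampling_graphs (r_tar : List Int) (r_all : List (List Int)) (length : Int) :
    List (List Int) × List (List Int) :=
  -- r_tar[0]/r_tar[1]; total via getD, exact under Pre_ (2 ≤ r_tar.length)
  let t0 := (PySem.List.pyGet? r_tar 0).getD 0
  let t1 := (PySem.List.pyGet? r_tar 1).getD 0
  (PySem.List.pyRange 0 length 1).foldl (pvAstep t0 t1 r_all) ([], [])

-- ===== PORT B =====
-- the body of B's blocked-value collecting loop over r_all ('if len(p) == 2: …')
def pvBstep (t0 t1 : Int) (s : PySem.Set Int × PySem.Set Int) (p : List Int) :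
    PySem.Set Int × PySem.Set Int :=
  match p with
  | [a, b] =>
    let s0 := if a = t0 then PySem.Set.add s.1 b else s.1
    let s0 := if b = t0 then PySem.Set.add s0 a else s0
    let s1 := if a = t1 then PySem.Set.add s.2 b else s.2
    let s1 := if b = t1 then PySem.Set.add s1 a else s1
    (s0, s1)
  | _ => s

def sampling_graphs_alt (r_tar : List Int) (r_all : List (List Int)) (length : Int) :
    List (List Int) × List (List Int) :=
  let t0 := (PySem.List.pyGet? r_tar 0).getD 0
  let t1 := (PySem.List.pyGet? r_tar 1).getD 0
  -- blocked0, blocked1 = {t0}, {t1}; then the loop over r_all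
  let bl := r_all.foldl (pvBstep t0 t1)
      (PySem.Set.add PySem.Set.empty t0, PySem.Set.add PySem.Set.empty t1)
  -- set(range(length)); sorted(set - blocked) is order-safe (sorted without key)
  let cand : PySem.Set Int := PySem.Set.ofList (PySem.List.pyRange 0 length 1)
  ((PySem.List.sorted (PySem.Set.diff cand bl.1) (fun x => x) false).map (fun i => [t0, i]),
   (PySem.List.sorted (PySem.Set.diff cand bl.2) (fun x => x) false).map (fun i => [i, t1]))

-- ===== PRECONDITION & SPEC =====
-- Pre_ excludes r_tar with fewer than two elements: there Python A raises IndexError whenever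
-- length > 0, and when length ≤ 0 A returns ([], []) but B still raises IndexError on r_tar[0].
def Pre_sampling_graphs (r_tar : List Int) (r_all : List (List Int)) (length : Int) : Prop :=
  2 ≤ r_tar.length
instance (r_tar : List Int) (r_all : List (List Int)) (length : Int) : Decidable (Pre_sampling_graphs r_tar r_all length) := by unfold Pre_sampling_graphs; infer_instance

def pvWitness_sampling_graphs : List Int × List (List Int) × Int := ([0, 2], [[0, 1], [1, 2]], 3)

def Spec_sampling_graphs (r_tar : List Int) (r_all : List (List Int)) (length : Int) (out : List (List Int) × List (List Int)) : Prop := out = sampling_graphs_alt r_tar r_all length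
instance (r_tar : List Int) (r_all : List (List Int)) (length : Int) (out : List (List Int) × List (List Int)) : Decidable (Spec_sampling_graphs r_tar r_all length out) := by unfold Spec_sampling_graphs; infer_instance

-- ===== CLAIM (what is proved, stated in full; the proofs are below) =====
def Claim_equal_sampling_graphs : Prop := ∀ (r_tar : List Int) (r_all : List (List Int)) (length : Int), Dom_sampling_graphs r_tar r_all length → Pre_sampling_graphs r_tar r_all length → Spec_sampling_graphs r_tar r_all length (sampling_graphs r_tar r_all length)

-- ===== LEMMAS AND PROOFS =====

-- membership in the pair produced by one pvBstep step
theorem pvBstep_mem (t0 t1 x : Int) (s : PySem.Set Int × PySem.Set Int) (p : List Int) :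
    (x ∈ (pvBstep t0 t1 s p).1 ↔ x ∈ s.1 ∨ p = [t0, x] ∨ p = [x, t0]) ∧
    (x ∈ (pvBstep t0 t1 s p).2 ↔ x ∈ s.2 ∨ p = [x, t1] ∨ p = [t1, x]) := by
  rcases p with _ | ⟨a, _ | ⟨b, _ | ⟨c, q⟩⟩⟩ <;>
    simp only [pvBstep] <;> try simp
  constructor <;>
    · split_ifs with h1 h2 <;> simp_all [PySem.Set.mem_add] <;> tauto

-- pure propositional shuffle used in the fold-membership induction step
theorem pvOrShuffle (a q1 q2 m1 m2 : Prop) :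
    ((a ∨ q1 ∨ q2) ∨ m1 ∨ m2) ↔ (a ∨ (q1 ∨ m1) ∨ (q2 ∨ m2)) := by tauto

-- membership in the blocked sets after folding pvBstep over r_all
theorem pvBstep_fold_mem (t0 t1 x : Int) (l : List (List Int)) :
    ∀ s : PySem.Set Int × PySem.Set Int,
    (x ∈ (l.foldl (pvBstep t0 t1) s).1 ↔ x ∈ s.1 ∨ [t0, x] ∈ l ∨ [x, t0] ∈ l) ∧
    (x ∈ (l.foldl (pvBstep t0 t1) s).2 ↔ x ∈ s.2 ∨ [x, t1] ∈ l ∨ [t1, x] ∈ l) := by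
  induction l with
  | nil => simp
  | cons p l ih =>
    intro s
    have hp := pvBstep_mem t0 t1 x s p
    have hc1 : (p = [t0, x]) ↔ ([t0, x] = p) := eq_comm
    have hc2 : (p = [x, t0]) ↔ ([x, t0] = p) := eq_comm
    have hc3 : (p = [x, t1]) ↔ ([x, t1] = p) := eq_comm
    have hc4 : (p = [t1, x]) ↔ ([t1, x] = p) := eq_comm
    refine ⟨?_, ?_⟩
    · rw [List.foldl_cons, (ih (pvBstep t0 t1 s p)).1, hp.1, List.mem_cons, List.mem_cons,
        hc1, hc2]
      exact pvOrShuffle _ _ _ _ _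
    · rw [List.foldl_cons, (ih (pvBstep t0 t1 s p)).2, hp.2, List.mem_cons, List.mem_cons,
        hc3, hc4]
      exact pvOrShuffle _ _ _ _ _

-- folding A's loop body equals a pair of filterMaps
theorem pvAstep_fold (t0 t1 : Int) (r_all : List (List Int)) (l : List Int) :
    ∀ d e : List (List Int),
    l.foldl (pvAstep t0 t1 r_all) (d, e) =
      (d ++ l.filterMap (fun i => if [t0, i] ∉ r_all ∧ [i, t0] ∉ r_all ∧ t0 ≠ i then some [t0, i] else none),
       e ++ l.filterMap (fun i => if [i, t1] ∉ r_all ∧ [t1, i] ∉ r_all ∧ t1 ≠ i then some [i, t1] else none)) := by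
  induction l with
  | nil => simp
  | cons i l ih =>
    intro d e
    simp only [List.foldl_cons, List.filterMap_cons]
    have : pvAstep t0 t1 r_all (d, e) i =
        ((if [t0, i] ∉ r_all ∧ [i, t0] ∉ r_all ∧ t0 ≠ i then d ++ [[t0, i]] else d),
         (if [i, t1] ∉ r_all ∧ [t1, i] ∉ r_all ∧ t1 ≠ i then e ++ [[i, t1]] else e)) := by
      unfold pvAstep; split_ifs <;> simp
    rw [this, ih]
    split_ifs <;> simp

-- map over a filter is the filterMap with the guarded some
theorem pvMapFilter {α β : Type} (f : α → β) (c : α → Prop) [DecidablePred c] (l : List α) :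
    (l.filter (fun x => decide (c x))).map f =
      l.filterMap (fun x => if c x then some (f x) else none) := by
  induction l with
  | nil => rfl
  | cons x l ih => by_cases h : c x <;> simp [h, ih]

-- sorted(set(pyRange) - t) is the ascending filter of pyRange
theorem pvSortedDiff (a b : Int) (t : PySem.Set Int) :
    PySem.List.sorted (PySem.Set.diff (PySem.Set.ofList (PySem.List.pyRange a b 1)) t)
        (fun x => x) false =
      (PySem.List.pyRange a b 1).filter (fun i => decide (i ∉ t)) := by
  rw [PySem.Set.ofList_eq_self_of_nodup _ (PySem.List.nodup_pyRange_one a b)]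
  have hd : PySem.Set.diff (PySem.List.pyRange a b 1) t =
      (PySem.List.pyRange a b 1).filter (fun i => decide (i ∉ t)) := by
    simp [PySem.Set.diff]
  rw [hd]
  apply PySem.List.sorted_eq_self_of_pairwise
  exact (List.Pairwise.sublist List.filter_sublist
    (PySem.List.pairwise_lt_pyRange_one a b)).imp (fun h => le_of_lt h)

theorem sampling_graphs_spec : Claim_equal_sampling_graphs := by
  unfold Claim_equal_sampling_graphs
  intro r_tar r_all length _ _
  unfold Spec_sampling_graphs sampling_graphs sampling_graphs_alt
  rw [pvAstep_fold]
  set t0 := (PySem.List.pyGet? r_tar 0).getD 0 with ht0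
  set t1 := (PySem.List.pyGet? r_tar 1).getD 0 with ht1
  simp only [List.nil_append]
  rw [pvSortedDiff, pvSortedDiff, pvMapFilter, pvMapFilter]
  have hmem := fun i => pvBstep_fold_mem t0 t1 i r_all
      (PySem.Set.add PySem.Set.empty t0, PySem.Set.add PySem.Set.empty t1)
  refine Prod.ext ?_ ?_
  · apply List.filterMap_congr
    intro i _
    refine if_congr ?_ rfl rfl
    rw [(hmem i).1]
    constructor
    · rintro ⟨hp, hq, hne⟩ (h | h | h)
      · simp [PySem.Set.empty] at h
        exact hne h.symm
      · exact hp h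
      · exact hq h
    · intro h
      refine ⟨fun hp => h (Or.inr (Or.inl hp)), fun hq => h (Or.inr (Or.inr hq)),
        fun e => h (Or.inl ?_)⟩
      simp [PySem.Set.empty, e]
  · apply List.filterMap_congr
    intro i _
    refine if_congr ?_ rfl rfl
    rw [(hmem i).2]
    constructor
    · rintro ⟨hp, hq, hne⟩ (h | h | h)
      · simp [PySem.Set.empty] at h
        exact hne h.symm
      · exact hp h
      · exact hq h
    · intro h
      refine ⟨fun hp => h (Or.inr (Or.inl hp)), fun hq => h (Or.inr (Or.inr hq)),
        fun e => h (Or.inl ?_)⟩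
      simp [PySem.Set.empty, e]
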